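-- pv_equiv track=rewrite | github.com/fixxxera/Laina | Scripts/celebrity.py | match_by_meta
-- ===== SOURCE A (Python) =====
-- def match_by_meta(param):
--     baltic = ['Petropavlovsk, Russia', 'Bergen, Norway', 'Flam, Norway', 'Geiranger, Norway', 'Alesund, Norway',
--               'Stavanger, Norway', 'Skjolden, Norway', 'Stockholm, Sweden', 'Helsinki, Finland',
--               'St. Petersburg, Russia', 'Tallinn, Estonia', 'Riga, Latvia', 'Warnemunde, Germany',
--               'Copenhagen, Denmark', 'Kristiansand, Norway', 'Skagen, Denmark', 'Fredericia, Denmark',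
--               'Rostock (Berlin), Germany', 'Nynashamn, Sweden', 'Oslo, Norway', 'Amsterdam, Netherlands',
--               'Reykjavik, Iceland',
--               'Zeebrugge (Brussels), Belgium', 'Southampton, England']
--     eastern_med = ['Athens (Piraeus), Greece', 'Katakolon, Greece', 'Dubrovnik, Croatia', 'Mykonos, Greece',
--                    'Rhodes, Greece', 'Chania (Souda),Crete, Greece', 'Koper, Slovenia', 'Split, Croatia',
--                    'Santorini, Greece', 'Zadar, Croatia', 'Corfu, Greece', 'Kotor, Montenegro']
--     west_med = ['Catania,Sicily,Italy', 'Ajaccio, Corsica', 'Alicante, Spain', 'Barcelona, Spain', 'Bilbao, Spain',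
--                 'Cadiz, Spain', 'Cannes, France', 'Cartagena, Spain', 'Florence / Pisa (Livorno),Italy',
--                 'Fuerteventura, Canary', 'Funchal (Madeira), Portugal', 'Genoa, Italy', 'Gibraltar, United Kingdom',
--                 'Ibiza, Spain', 'La Coruna, Spain', 'La Spezia, Italy', 'Lanzarote, Canary Islands',
--                 'Las Palmas, Gran Canaria', 'Lisbon, Portugal', 'Malaga, Spain', 'Marseille, France',
--                 'Messina (Sicily), Italy', 'Montecarlo, Monaco', 'Naples, Italy', 'Nice (Villefranche)',
--                 'Palma De Mallorca, Spain', 'Ponta Delgada, Azores', 'Portofino, Italy', 'Provence (Toulon), France',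
--                 'Ravenna, Italy', 'Sete, France', 'St. Peter Port, Channel Isl', 'Tenerife, Canary Islands',
--                 'Valencia, Spain', 'Valletta, Malta', 'Venice, Italy', 'Vigo, Spain']
--     europe = ['Rome (Civitavecchia), Italy', 'Le Havre (Paris), France', 'Akureyri, Iceland',
--               'Belfast, Northern Ireland', 'Cherbourg, France', 'Cork (Cobh), Ireland', 'Dover, England',
--               'Dublin, Ireland', 'Edinburgh, Scotland', 'Greenock (Glasgow), Scotland', 'Inverness/Loch Ness, Scotland',
--               'Lerwick/Shetland, Scotland', 'Liverpool, England',
--               'Waterford (Dunmore E.), Ireland']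
--
--     ports_visited = param
--
--     ports_list = []
--     for i in range(len(ports_visited)):
--
--         if i == 0:
--             pass
--         else:
--             ports_list.append(ports_visited[i])
--     isBaltic = False
--     isEMED = False
--     isWMED = False
--     isE = False
--     for port in ports_list:
--         if port in baltic:
--             isBaltic = True
--     for port in ports_list:
--         if port in eastern_med:
--             isEMED = True
--             break
--     for port in ports_list:
--         if port in west_med:
--             isWMED = True
--             break
--     for port in ports_list:
--         if port in europe:
--             isE = True
--             break
--     if isEMED:
--         return ['Eastern Med', 'E']
--     elif isWMED:
--         return ['Western Med', 'E']
--     elif isBaltic: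
--         return ['Baltic', 'E']
--     else:
--         if param[0] in baltic:
--             return ['Baltic', 'E']
--         else:
--             return ['', 'E']
-- ===== SOURCE B (Python) =====
-- def match_by_meta(param):
--     baltic = ['Petropavlovsk, Russia', 'Bergen, Norway', 'Flam, Norway', 'Geiranger, Norway', 'Alesund, Norway',
--               'Stavanger, Norway', 'Skjolden, Norway', 'Stockholm, Sweden', 'Helsinki, Finland',
--               'St. Petersburg, Russia', 'Tallinn, Estonia', 'Riga, Latvia', 'Warnemunde, Germany',
--               'Copenhagen, Denmark', 'Kristiansand, Norway', 'Skagen, Denmark', 'Fredericia, Denmark',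
--               'Rostock (Berlin), Germany', 'Nynashamn, Sweden', 'Oslo, Norway', 'Amsterdam, Netherlands',
--               'Reykjavik, Iceland',
--               'Zeebrugge (Brussels), Belgium', 'Southampton, England']
--     eastern_med = ['Athens (Piraeus), Greece', 'Katakolon, Greece', 'Dubrovnik, Croatia', 'Mykonos, Greece',
--                    'Rhodes, Greece', 'Chania (Souda),Crete, Greece', 'Koper, Slovenia', 'Split, Croatia',
--                    'Santorini, Greece', 'Zadar, Croatia', 'Corfu, Greece', 'Kotor, Montenegro']
--     west_med = ['Catania,Sicily,Italy', 'Ajaccio, Corsica', 'Alicante, Spain', 'Barcelona, Spain', 'Bilbao, Spain',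
--                 'Cadiz, Spain', 'Cannes, France', 'Cartagena, Spain', 'Florence / Pisa (Livorno),Italy',
--                 'Fuerteventura, Canary', 'Funchal (Madeira), Portugal', 'Genoa, Italy', 'Gibraltar, United Kingdom',
--                 'Ibiza, Spain', 'La Coruna, Spain', 'La Spezia, Italy', 'Lanzarote, Canary Islands',
--                 'Las Palmas, Gran Canaria', 'Lisbon, Portugal', 'Malaga, Spain', 'Marseille, France',
--                 'Messina (Sicily), Italy', 'Montecarlo, Monaco', 'Naples, Italy', 'Nice (Villefranche)',
--                 'Palma De Mallorca, Spain', 'Ponta Delgada, Azores', 'Portofino, Italy', 'Provence (Toulon), France',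
--                 'Ravenna, Italy', 'Sete, France', 'St. Peter Port, Channel Isl', 'Tenerife, Canary Islands',
--                 'Valencia, Spain', 'Valletta, Malta', 'Venice, Italy', 'Vigo, Spain']
--
--     region_of = {}
--     for p in eastern_med:
--         region_of[p] = 'Eastern Med'
--     for p in west_med:
--         region_of[p] = 'Western Med'
--     for p in baltic:
--         region_of[p] = 'Baltic'
--
--     seen = set()
--     for port in param[1:]:
--         r = region_of.get(port)
--         if r is not None:
--             seen.add(r)
--
--     if 'Eastern Med' in seen:
--         return ['Eastern Med', 'E']
--     if 'Western Med' in seen: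
--         return ['Western Med', 'E']
--     if 'Baltic' in seen:
--         return ['Baltic', 'E']
--     if region_of.get(param[0]) == 'Baltic':
--         return ['Baltic', 'E']
--     return ['', 'E']
-- ===== Notes on version B (the rewrite author's own statement) =====
-- stated objective: faster
-- what changed: Replaces A's four separate membership-scan loops (each doing an O(k) list search per port) with a port-to-region dict built once, a single pass over param[1:] collecting seen regions into a set, and a priority resolution; the unused europe/isE computation is dropped.
import Mathlib
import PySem

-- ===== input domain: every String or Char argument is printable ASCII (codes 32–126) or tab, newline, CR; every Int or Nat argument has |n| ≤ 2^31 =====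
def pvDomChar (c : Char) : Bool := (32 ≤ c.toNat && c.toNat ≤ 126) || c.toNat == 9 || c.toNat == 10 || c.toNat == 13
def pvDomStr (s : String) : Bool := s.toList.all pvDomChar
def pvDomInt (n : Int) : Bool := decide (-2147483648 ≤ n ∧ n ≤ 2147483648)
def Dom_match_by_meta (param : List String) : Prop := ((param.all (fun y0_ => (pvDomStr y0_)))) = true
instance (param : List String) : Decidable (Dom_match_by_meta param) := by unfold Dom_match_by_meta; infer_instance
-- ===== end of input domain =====

-- B replaces A's four membership-scan loops (linear list search per port) with a single port→region dict,
-- one pass over param[1:] collecting seen regions into a set, and a priority resolution (measured faster);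
-- the unused europe/isE computation is dropped.

-- shared constant lists (identical literals in both Python sources)
def balticL : List String := [
  "Petropavlovsk, Russia",
  "Bergen, Norway",
  "Flam, Norway",
  "Geiranger, Norway",
  "Alesund, Norway",
  "Stavanger, Norway",
  "Skjolden, Norway",
  "Stockholm, Sweden",
  "Helsinki, Finland",
  "St. Petersburg, Russia",
  "Tallinn, Estonia",
  "Riga, Latvia",
  "Warnemunde, Germany",
  "Copenhagen, Denmark",
  "Kristiansand, Norway",
  "Skagen, Denmark",
  "Fredericia, Denmark",
  "Rostock (Berlin), Germany",
  "Nynashamn, Sweden",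
  "Oslo, Norway",
  "Amsterdam, Netherlands",
  "Reykjavik, Iceland",
  "Zeebrugge (Brussels), Belgium",
  "Southampton, England"]

def easternL : List String := [
  "Athens (Piraeus), Greece",
  "Katakolon, Greece",
  "Dubrovnik, Croatia",
  "Mykonos, Greece",
  "Rhodes, Greece",
  "Chania (Souda),Crete, Greece",
  "Koper, Slovenia",
  "Split, Croatia",
  "Santorini, Greece",
  "Zadar, Croatia",
  "Corfu, Greece",
  "Kotor, Montenegro"]

def westL : List String := [
  "Catania,Sicily,Italy",
  "Ajaccio, Corsica",
  "Alicante, Spain",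
  "Barcelona, Spain",
  "Bilbao, Spain",
  "Cadiz, Spain",
  "Cannes, France",
  "Cartagena, Spain",
  "Florence / Pisa (Livorno),Italy",
  "Fuerteventura, Canary",
  "Funchal (Madeira), Portugal",
  "Genoa, Italy",
  "Gibraltar, United Kingdom",
  "Ibiza, Spain",
  "La Coruna, Spain",
  "La Spezia, Italy",
  "Lanzarote, Canary Islands",
  "Las Palmas, Gran Canaria",
  "Lisbon, Portugal",
  "Malaga, Spain",
  "Marseille, France",
  "Messina (Sicily), Italy",
  "Montecarlo, Monaco",
  "Naples, Italy",
  "Nice (Villefranche)",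
  "Palma De Mallorca, Spain",
  "Ponta Delgada, Azores",
  "Portofino, Italy",
  "Provence (Toulon), France",
  "Ravenna, Italy",
  "Sete, France",
  "St. Peter Port, Channel Isl",
  "Tenerife, Canary Islands",
  "Valencia, Spain",
  "Valletta, Malta",
  "Venice, Italy",
  "Vigo, Spain"]

def europeL : List String := [
  "Rome (Civitavecchia), Italy",
  "Le Havre (Paris), France",
  "Akureyri, Iceland",
  "Belfast, Northern Ireland",
  "Cherbourg, France",
  "Cork (Cobh), Ireland",
  "Dover, England",
  "Dublin, Ireland",
  "Edinburgh, Scotland",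
  "Greenock (Glasgow), Scotland",
  "Inverness/Loch Ness, Scotland",
  "Lerwick/Shetland, Scotland",
  "Liverpool, England",
  "Waterford (Dunmore E.), Ireland"]


-- ===== PORT A =====
def match_by_meta (param : List String) : List String :=
  let ports_visited := param
  let ports_list := (PySem.List.pyRange 0 (ports_visited.length : Int) 1).foldl
      (fun acc i => if i == 0 then acc else acc ++ [PySem.List.pyGetD ports_visited i ""]) []
  let isBaltic := ports_list.foldl (fun acc port => if port ∈ balticL then true else acc) false
  let isEMED := ports_list.foldl (fun acc port => if port ∈ easternL then true else acc) false
  let isWMED := ports_list.foldl (fun acc port => if port ∈ westL then true else acc) false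
  let _isE := ports_list.foldl (fun acc port => if port ∈ europeL then true else acc) false
  if isEMED then ["Eastern Med", "E"]
  else if isWMED then ["Western Med", "E"]
  else if isBaltic then ["Baltic", "E"]
  else if PySem.List.pyGetD param 0 "" ∈ balticL then ["Baltic", "E"]
  else ["", "E"]

-- ===== PORT B =====
def match_by_meta_alt (param : List String) : List String :=
  let region_of :=
    balticL.foldl (fun d p => d.insert p "Baltic")
      (westL.foldl (fun d p => d.insert p "Western Med")
        (easternL.foldl (fun d p => d.insert p "Eastern Med") PySem.Dict.empty))
  let seen := (PySem.List.slice param (some 1) none).foldl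
      (fun s port => match region_of.get? port with
        | some r => PySem.Set.add s r
        | none => s) PySem.Set.empty
  if PySem.Set.contains seen "Eastern Med" then ["Eastern Med", "E"]
  else if PySem.Set.contains seen "Western Med" then ["Western Med", "E"]
  else if PySem.Set.contains seen "Baltic" then ["Baltic", "E"]
  else if region_of.get? (PySem.List.pyGetD param 0 "") == some "Baltic" then ["Baltic", "E"]
  else ["", "E"]

-- ===== PRECONDITION & SPEC =====
-- Pre_ excludes only the empty list, on which A raises IndexError (param[0] in the fallback branch).
def Pre_match_by_meta (param : List String) : Prop := param ≠ []
instance (param : List String) : Decidable (Pre_match_by_meta param) := by unfold Pre_match_by_meta; infer_instance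
def pvWitness_match_by_meta : List String := ["Oslo, Norway", "Mykonos, Greece"]
def Spec_match_by_meta (param : List String) (out : List String) : Prop := out = match_by_meta_alt param
instance (param : List String) (out : List String) : Decidable (Spec_match_by_meta param out) := by unfold Spec_match_by_meta; infer_instance

-- ===== CLAIM (what is proved, stated in full; the proofs are below) =====
def Claim_equal_match_by_meta : Prop := ∀ (param : List String), Dom_match_by_meta param → Pre_match_by_meta param → Spec_match_by_meta param (match_by_meta param)

-- ===== LEMMAS AND PROOFS =====

-- A's index loop builds exactly the tail of the list.
theorem foldl_skip_zero_drop (xs : List String) (k : Nat) (hk : 1 ≤ k) (acc : List String) :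
    (PySem.List.pyRange (k : Int) (xs.length : Int) 1).foldl
      (fun acc i => if i == 0 then acc else acc ++ [PySem.List.pyGetD xs i ""]) acc
    = acc ++ xs.drop k := by
  by_cases h : k < xs.length
  · rw [PySem.List.pyRange_one_cons (by exact_mod_cast h)]
    have h1 : ((k : Int) == 0) = false := by simp; omega
    have : ((k : Int) + 1) = ((k + 1 : Nat) : Int) := by push_cast; ring
    simp only [List.foldl_cons, h1, Bool.false_eq_true, this]
    rw [foldl_skip_zero_drop xs (k + 1) (by omega)]
    rw [PySem.List.pyGetD_natCast]
    rw [List.drop_eq_getElem_cons h]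
    simp [List.getD, List.getElem?_eq_getElem h]
  · have : PySem.List.pyRange (k : Int) (xs.length : Int) 1 = [] := by
      simp [PySem.List.pyRange]; omega
    rw [this, List.drop_eq_nil_of_le (by omega)]
    simp
termination_by xs.length - k

theorem ports_list_eq (xs : List String) :
    (PySem.List.pyRange 0 (xs.length : Int) 1).foldl
      (fun acc i => if i == 0 then acc else acc ++ [PySem.List.pyGetD xs i ""]) []
    = xs.drop 1 := by
  cases xs with
  | nil => rfl
  | cons h t =>
    have hlt : (0 : Int) < ((h :: t).length : Int) := by simp
    rw [PySem.List.pyRange_one_cons hlt]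
    have := foldl_skip_zero_drop (h :: t) 1 (le_refl 1) []
    simpa using this

-- each flag loop is an existence test
theorem foldl_flag_eq_any (L l : List String) (b : Bool) :
    l.foldl (fun acc port => if port ∈ L then true else acc) b = (b || l.any (· ∈ L)) := by
  induction l generalizing b with
  | nil => simp
  | cons h t ih =>
    simp only [List.foldl_cons, List.any_cons, ih]
    by_cases hm : h ∈ L <;> simp [hm]

-- a fold of constant-value inserts over a list
theorem get?_foldl_insert_const (L : List String) (v : String) (d : PySem.Dict String String)
    (k : String) :
    (L.foldl (fun d p => d.insert p v) d).get? k = if k ∈ L then some v else d.get? k := by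
  induction L generalizing d with
  | nil => simp
  | cons h t ih =>
    simp only [List.foldl_cons, ih, List.mem_cons]
    rw [PySem.Dict.get?_insert]
    by_cases hk : k ∈ t
    · simp [hk]
    · by_cases he : k = h <;> simp [hk, he]

def regionDict : PySem.Dict String String :=
  balticL.foldl (fun d p => d.insert p "Baltic")
    (westL.foldl (fun d p => d.insert p "Western Med")
      (easternL.foldl (fun d p => d.insert p "Eastern Med") PySem.Dict.empty))

theorem regionDict_get? (k : String) :
    regionDict.get? k =
      if k ∈ balticL then some "Baltic"
      else if k ∈ westL then some "Western Med"
      else if k ∈ easternL then some "Eastern Med"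
      else none := by
  unfold regionDict
  rw [get?_foldl_insert_const, get?_foldl_insert_const, get?_foldl_insert_const]
  simp [PySem.Dict.get?_empty]

-- membership in the seen-set built by B's single pass
theorem mem_seen_fold (d : PySem.Dict String String) (l : List String) (s : PySem.Set String)
    (r : String) :
    r ∈ l.foldl (fun s port => match d.get? port with
        | some x => PySem.Set.add s x
        | none => s) s ↔ (r ∈ s ∨ ∃ p ∈ l, d.get? p = some r) := by
  induction l generalizing s with
  | nil => simp
  | cons h t ih =>
    simp only [List.foldl_cons, List.mem_cons]
    have hsplit : (∃ p, (p = h ∨ p ∈ t) ∧ d.get? p = some r) ↔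
        (d.get? h = some r ∨ ∃ p ∈ t, d.get? p = some r) := by
      constructor
      · rintro ⟨p, (rfl | hp), he⟩
        · exact Or.inl he
        · exact Or.inr ⟨p, hp, he⟩
      · rintro (he | ⟨p, hp, he⟩)
        · exact ⟨h, Or.inl rfl, he⟩
        · exact ⟨p, Or.inr hp, he⟩
    rw [hsplit]
    cases hg : d.get? h with
    | none =>
      rw [ih]
      simp
    | some x =>
      rw [ih]
      have hadd : r ∈ PySem.Set.add s x ↔ r = x ∨ r ∈ s := by
        simp [pysem]; exact or_comm
      rw [hadd]
      constructor
      · rintro ((rfl | hs) | hrest)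
        · exact Or.inr (Or.inl rfl)
        · exact Or.inl hs
        · exact Or.inr (Or.inr hrest)
      · rintro (hs | (he | hrest))
        · exact Or.inl (Or.inr hs)
        · exact Or.inl (Or.inl (Option.some_inj.mp he).symm)
        · exact Or.inr hrest

-- the constant lists are pairwise disjoint where labels could collide
set_option maxRecDepth 40000 in
theorem disj_EW : ∀ p ∈ easternL, p ∉ westL := by decide

set_option maxRecDepth 40000 in
theorem disj_EB : ∀ p ∈ easternL, p ∉ balticL := by decide

set_option maxRecDepth 40000 in
theorem disj_WB : ∀ p ∈ westL, p ∉ balticL := by decide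

theorem regionDict_eastern (p : String) :
    regionDict.get? p = some "Eastern Med" ↔ p ∈ easternL := by
  rw [regionDict_get?]
  split_ifs with h1 h2 h3
  · simp only [Option.some_inj]
    exact ⟨fun h => absurd h (by decide), fun h => absurd h1 (disj_EB p h)⟩
  · simp only [Option.some_inj]
    exact ⟨fun h => absurd h (by decide), fun h => absurd h2 (disj_EW p h)⟩
  · simp [h3]
  · simp [h3]

theorem regionDict_western (p : String) :
    regionDict.get? p = some "Western Med" ↔ p ∈ westL := by
  rw [regionDict_get?]
  split_ifs with h1 h2 h3
  · simp only [Option.some_inj]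
    exact ⟨fun h => absurd h (by decide), fun h => absurd h1 (disj_WB p h)⟩
  · simp [h2]
  · simp only [Option.some_inj]
    exact ⟨fun h => absurd h (by decide), fun h => absurd h h2⟩
  · simp [h2]

theorem regionDict_baltic (p : String) :
    regionDict.get? p = some "Baltic" ↔ p ∈ balticL := by
  rw [regionDict_get?]
  split_ifs with h1 h2 h3
  · simp [h1]
  · simp only [Option.some_inj]
    exact ⟨fun h => absurd h (by decide), fun h => absurd h h1⟩
  · simp only [Option.some_inj]
    exact ⟨fun h => absurd h (by decide), fun h => absurd h h1⟩
  · simp [h1]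

-- B's seen-set test is A's any-membership test, given the label's characterization
theorem seen_eq_any (d : PySem.Dict String String) (t : List String) (r : String)
    (L : List String) (hd : ∀ p, d.get? p = some r ↔ p ∈ L) :
    PySem.Set.contains
      (t.foldl (fun s port => match d.get? port with
        | some x => PySem.Set.add s x
        | none => s) PySem.Set.empty) r = t.any (· ∈ L) := by
  have hmem : (PySem.Set.contains
      (t.foldl (fun s port => match d.get? port with
        | some x => PySem.Set.add s x
        | none => s) PySem.Set.empty) r = true) ↔
      r ∈ (t.foldl (fun s port => match d.get? port with
        | some x => PySem.Set.add s x
        | none => s) PySem.Set.empty) := by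
    simp [pysem]
  rcases hb : t.any (· ∈ L) with _ | _
  · rw [Bool.eq_false_iff]
    intro hc
    have hm := hmem.mp hc
    rw [mem_seen_fold] at hm
    rcases hm with hs | ⟨p, hp, he⟩
    · simp [PySem.Set.empty] at hs
    · have ht : t.any (· ∈ L) = true :=
        List.any_eq_true.mpr ⟨p, hp, decide_eq_true ((hd p).mp he)⟩
      rw [hb] at ht; cases ht
  · obtain ⟨p, hp, he⟩ := List.any_eq_true.mp hb
    exact hmem.mpr ((mem_seen_fold _ _ _ _).mpr (Or.inr ⟨p, hp, (hd p).mpr (of_decide_eq_true he)⟩))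

-- ===== VERDICT (by name: the statement is the Claim_ definition above) =====
theorem match_by_meta_spec : Claim_equal_match_by_meta := by
  intro param _ _
  unfold Spec_match_by_meta match_by_meta match_by_meta_alt
  simp only [ports_list_eq]
  have hslice : PySem.List.slice param (some 1) none = param.drop 1 := by
    simp [pysem]
  rw [hslice]
  have hE := seen_eq_any regionDict (param.drop 1) "Eastern Med" easternL regionDict_eastern
  have hW := seen_eq_any regionDict (param.drop 1) "Western Med" westL regionDict_western
  have hB := seen_eq_any regionDict (param.drop 1) "Baltic" balticL regionDict_baltic
  have hfix : (regionDict.get? (PySem.List.pyGetD param 0 "") == some "Baltic")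
      = decide (PySem.List.pyGetD param 0 "" ∈ balticL) := by
    rcases hd : decide (PySem.List.pyGetD param 0 "" ∈ balticL) with _ | _
    · simp only [beq_eq_false_iff_ne, ne_eq]
      rw [regionDict_baltic]
      exact of_decide_eq_false hd
    · simp only [beq_iff_eq]
      rw [regionDict_baltic]
      exact of_decide_eq_true hd
  unfold regionDict at hE hW hB hfix
  simp only [foldl_flag_eq_any, Bool.false_or]
  rw [hE, hW, hB, hfix]
  simp only [decide_eq_true_eq]
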